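-- pv_equiv track=rewrite | github.com/nexxababy/gaming-bot | shivu/modules/guess.py | masked_answer
-- ===== SOURCE A (Python) =====
-- def masked_answer(answer: str, reveal_n: int) -> str:
--     """
--     Reveal first N alphanumeric characters across the whole answer (spaces/punct stay same).
--     E.g., "Naruto Uzumaki" with N=1 -> "N***** *******"
--           N=2 -> "Na**** ******"
--     """
--     shown = 0
--     out = []
--     for ch in answer:
--         if ch.isalnum():
--             if shown < reveal_n:
--                 out.append(ch)
--                 shown += 1
--             else:
--                 out.append('*')
--         else:
--             out.append(ch)
--     return ''.join(out)
-- ===== SOURCE B (Python) =====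
-- def masked_answer(answer: str, reveal_n: int) -> str:
--     # Precompute cumulative alnum counts, then decide each position locally.
--     counts = []
--     c = 0
--     for ch in answer:
--         if ch.isalnum():
--             c += 1
--         counts.append(c)
--     return ''.join(ch if (not ch.isalnum() or k <= reveal_n) else '*'
--                    for ch, k in zip(answer, counts))
-- ===== Notes on version B (the rewrite author's own statement) =====
-- stated objective: alternative
-- what changed: Replaces the running reveal-counter threaded through the emit loop by a precomputed prefix-count table of alphanumeric characters, so each output character is decided by a position-local comparison over zip(answer, counts).
import Mathlib
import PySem

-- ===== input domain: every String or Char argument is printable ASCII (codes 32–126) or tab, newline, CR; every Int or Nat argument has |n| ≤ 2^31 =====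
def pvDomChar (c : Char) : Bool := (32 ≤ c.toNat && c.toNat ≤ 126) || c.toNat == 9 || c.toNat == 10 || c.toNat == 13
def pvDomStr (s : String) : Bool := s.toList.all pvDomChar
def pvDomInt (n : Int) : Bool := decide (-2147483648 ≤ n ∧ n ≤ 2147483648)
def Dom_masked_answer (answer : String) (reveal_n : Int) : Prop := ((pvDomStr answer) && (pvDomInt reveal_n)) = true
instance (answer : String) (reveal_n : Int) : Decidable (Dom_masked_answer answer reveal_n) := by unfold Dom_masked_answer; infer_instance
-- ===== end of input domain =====

-- B replaces A's running reveal-counter with a precomputed prefix-count table and a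
-- position-local decision over zip(answer, counts); same cost, different decomposition.
-- ===== PORT A =====
-- A's for-loop over the characters, threading the mutable 'shown' counter.
def maskedLoopA (reveal_n : Int) : List Char → Int → List Char
  | [], _ => []
  | ch :: cs, shown =>
    if PySem.Chars.isalnum ch then
      if shown < reveal_n then ch :: maskedLoopA reveal_n cs (shown + 1)
      else '*' :: maskedLoopA reveal_n cs shown
    else ch :: maskedLoopA reveal_n cs shown

def masked_answer (answer : String) (reveal_n : Int) : String :=
  String.mk (maskedLoopA reveal_n answer.toList 0)

-- ===== PORT B =====
-- B's first pass: cumulative (inclusive) alnum counts per position.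
def prefixCountsB : List Char → Int → List Int
  | [], _ => []
  | ch :: cs, c =>
    let c' := if PySem.Chars.isalnum ch then c + 1 else c
    c' :: prefixCountsB cs c'

def masked_answer_alt (answer : String) (reveal_n : Int) : String :=
  String.mk ((answer.toList.zip (prefixCountsB answer.toList 0)).map
    (fun p => if (!PySem.Chars.isalnum p.1) || decide (p.2 ≤ reveal_n) then p.1 else '*'))

-- ===== PRECONDITION & SPEC =====
def Spec_masked_answer (answer : String) (reveal_n : Int) (out : String) : Prop := out = masked_answer_alt answer reveal_n
instance (answer : String) (reveal_n : Int) (out : String) : Decidable (Spec_masked_answer answer reveal_n out) := by unfold Spec_masked_answer; infer_instance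

-- ===== CLAIM (what is proved, stated in full; the proofs are below) =====
def Claim_equal_masked_answer : Prop := ∀ (answer : String) (reveal_n : Int), Dom_masked_answer answer reveal_n → Spec_masked_answer answer reveal_n (masked_answer answer reveal_n)

-- ===== LEMMAS AND PROOFS =====



theorem loop_eq (r : Int) : ∀ (cs : List Char) (c : Int), 0 ≤ c →
    maskedLoopA r cs (min c (max r 0)) =
    (cs.zip (prefixCountsB cs c)).map
      (fun p => if (!PySem.Chars.isalnum p.1) || decide (p.2 ≤ r) then p.1 else '*')
  | [], _, _ => rfl
  | ch :: cs, c, hc => by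
    simp only [maskedLoopA, prefixCountsB, List.zip_cons_cons, List.map_cons]
    by_cases h : PySem.Chars.isalnum ch
    · simp only [h, if_true]
      by_cases hr : c + 1 ≤ r
      · have h1 : min c (max r 0) < r := by omega
        have h2 : min c (max r 0) + 1 = min (c + 1) (max r 0) := by omega
        rw [if_pos h1, h2, loop_eq r cs (c + 1) (by omega)]
        simp [hr]
      · have h1 : ¬ min c (max r 0) < r := by omega
        have h2 : min c (max r 0) = min (c + 1) (max r 0) := by omega
        rw [if_neg h1, h2, loop_eq r cs (c + 1) (by omega)]
        simp [hr]
    · simp only [h, if_false, Bool.false_eq_true]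
      rw [loop_eq r cs c hc]
      simp

-- ===== VERDICT (by name: the statement is the Claim_ definition above) =====
theorem masked_answer_spec : Claim_equal_masked_answer := by
  intro answer reveal_n _
  unfold Spec_masked_answer masked_answer masked_answer_alt
  have h := loop_eq reveal_n answer.toList 0 le_rfl
  rw [show min (0:Int) (max reveal_n 0) = 0 from by omega] at h
  rw [h]
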